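-- pv_equiv track=rewrite | github.com/liuchuo/PAT | AdvancedLevel_Python/1089.py | next_merge_sort
-- ===== SOURCE A (Python) =====
-- def next_merge_sort(i, now):
--     def merge(arr1, arr2):
--         tmp = arr1 + arr2
--         tmp.sort()
--         return tmp
--     import math
--     step = int(math.pow(2, i-1))
--     tmp = []
--     for j in range(0, len(now), step * 2):
--         tmp += merge(now[j:j+step], now[j+step:j+step*2])
--     return tmp
-- ===== SOURCE B (Python) =====
-- def next_merge_sort(i, now):
--     step = 1 << (i - 1)
--
--     def merge2(a, b):
--         res = []
--         x = y = 0
--         while x < len(a) and y < len(b):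
--             if a[x] <= b[y]:
--                 res.append(a[x])
--                 x += 1
--             else:
--                 res.append(b[y])
--                 y += 1
--         return res + a[x:] + b[y:]
--
--     out = []
--     rest = now
--     while rest:
--         out += merge2(rest[:step], rest[step:2 * step])
--         rest = rest[2 * step:]
--     return out
-- ===== Notes on version B (the rewrite author's own statement) =====
-- stated objective: faster
-- what changed: Instead of concatenating each adjacent block pair and re-sorting it with list.sort (O(step log step) per pair), B merges the two already-sorted blocks with a linear two-pointer merge that takes the left element on ties, chopping the list front-to-back.
-- outside the precondition, e.g. on next_merge_sort(2, [2, 1, 4, 3]): A returns [1, 2, 3, 4], B returns [2, 1, 4, 3]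
import Mathlib
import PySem

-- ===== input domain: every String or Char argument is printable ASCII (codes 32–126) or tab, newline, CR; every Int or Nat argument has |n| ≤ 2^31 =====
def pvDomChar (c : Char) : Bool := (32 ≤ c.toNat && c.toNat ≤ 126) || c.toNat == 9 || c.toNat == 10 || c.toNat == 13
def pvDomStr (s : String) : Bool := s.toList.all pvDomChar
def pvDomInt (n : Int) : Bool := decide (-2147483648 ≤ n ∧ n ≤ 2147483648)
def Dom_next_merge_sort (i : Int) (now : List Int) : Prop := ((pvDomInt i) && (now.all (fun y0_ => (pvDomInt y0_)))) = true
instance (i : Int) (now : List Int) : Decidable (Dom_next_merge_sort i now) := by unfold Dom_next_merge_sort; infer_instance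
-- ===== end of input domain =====

-- ===== PORT A =====
-- B replaces A's per-pair `sort` of the concatenated blocks by a linear two-pointer merge
-- of the two (already sorted, per Pre_) blocks; RETURN-value equivalence on Pre_.
def next_merge_sort (i : Int) (now : List Int) : List Int :=
  -- step = int(math.pow(2, i-1)); exact for the 1 <= i <= 1024 admitted by Pre_
  let step : Int := 2 ^ (i - 1).toNat
  (PySem.List.pyRange 0 (PySem.List.len now) (step * 2)).foldl
    (fun tmp j =>
      tmp ++ PySem.List.sorted
        (PySem.List.slice now (some j) (some (j + step)) ++
         PySem.List.slice now (some (j + step)) (some (j + step * 2)))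
        (fun x => x) false)
    []

-- ===== PORT B =====
-- two-pointer merge (Source B's merge2): takes the left element on ties
def mergeTwo : List Int → List Int → List Int
  | [], b => b
  | a, [] => a
  | x :: a, y :: b => if x ≤ y then x :: mergeTwo a (y :: b) else y :: mergeTwo (x :: a) b

-- Source B's outer `while rest:` loop, chopping one pair of blocks off the front each round
def altLoop (step : Nat) (rest : List Int) : List Int :=
  if _hs : step = 0 then []          -- unreachable totality guard: step = 2^(i-1) ≥ 1
  else if hr : rest = [] then []
  else
    mergeTwo (rest.take step) ((rest.drop step).take step) ++ altLoop step (rest.drop (step * 2))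
termination_by rest.length
decreasing_by
  simp only [List.length_drop]
  have : 0 < rest.length := List.length_pos_iff.mpr hr
  omega

def next_merge_sort_alt (i : Int) (now : List Int) : List Int :=
  -- step = 1 << (i - 1)
  let step : Nat := 2 ^ (i - 1).toNat
  altLoop step now

-- ===== PRECONDITION & SPEC =====
-- Pre_ excludes i ≤ 0 (A: range(..., 0) raises ValueError) and i ≥ 1025 (A: math.pow(2, i-1)
-- raises OverflowError), and it excludes inputs whose length-2^(i-1) blocks are not already
-- sorted: a merge pass is only specified on sorted blocks (its contract in this merge sort),
-- and on unsorted blocks A re-sorts each pair from scratch while B merges (see cites).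
-- shape check: scanning from position j, every adjacent pair lying inside the same
-- length-S block (i.e. block boundaries are the positions divisible by S) is ordered
def blocksSortedB (S : Nat) : List Int → Nat → Bool
  | [], _ => true
  | [_], _ => true
  | x :: y :: t, j => ((j + 1) % S == 0 || x ≤ y) && blocksSortedB S (y :: t) (j + 1)

def Pre_next_merge_sort (i : Int) (now : List Int) : Prop :=
  1 ≤ i ∧ i ≤ 1024 ∧ blocksSortedB (2 ^ (i - 1).toNat) now 0 = true
instance (i : Int) (now : List Int) : Decidable (Pre_next_merge_sort i now) := by
  unfold Pre_next_merge_sort; infer_instance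

def pvWitness_next_merge_sort : Int × List Int := (2, [1, 3, 0, 2])

def Spec_next_merge_sort (i : Int) (now : List Int) (out : List Int) : Prop := out = next_merge_sort_alt i now
instance (i : Int) (now : List Int) (out : List Int) : Decidable (Spec_next_merge_sort i now out) := by unfold Spec_next_merge_sort; infer_instance

-- ===== CLAIM (what is proved, stated in full; the proofs are below) =====
def Claim_equal_next_merge_sort : Prop := ∀ (i : Int) (now : List Int), Dom_next_merge_sort i now → Pre_next_merge_sort i now → Spec_next_merge_sort i now (next_merge_sort i now)

-- ===== LEMMAS AND PROOFS =====

-- Pre_'s third conjunct: adjacent elements inside each length-S block are ordered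
def BSorted (S : Nat) (l : List Int) : Prop :=
  ∀ j : Nat, j < l.length - 1 → ((j + 1) % S ≠ 0 → l.getD j 0 ≤ l.getD (j + 1) 0)

theorem bsorted_of_bool (S : Nat) : ∀ (l : List Int) (j0 : Nat),
    blocksSortedB S l j0 = true →
    ∀ j : Nat, j < l.length - 1 →
      ((j0 + j + 1) % S ≠ 0 → l.getD j 0 ≤ l.getD (j + 1) 0)
  | [], _, _, j, hj => by simp at hj
  | [_], _, _, j, hj => by simp at hj
  | x :: y :: t, j0, h, j, hj => by
    rw [blocksSortedB, Bool.and_eq_true, Bool.or_eq_true, beq_iff_eq, decide_eq_true_iff]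
      at h
    intro hm
    match j with
    | 0 =>
      rcases h.1 with h1 | h1
      · exact absurd (by simpa using h1) hm
      · simpa using h1
    | Nat.succ k =>
      have := bsorted_of_bool S (y :: t) (j0 + 1) h.2 k
        (by simp at hj ⊢; omega)
        (by rw [show j0 + 1 + k + 1 = j0 + (k + 1) + 1 from by omega]; exact hm)
      simpa using this

theorem bsorted_of_pre (S : Nat) (l : List Int) (h : blocksSortedB S l 0 = true) :
    BSorted S l := by
  intro j hj hm
  exact bsorted_of_bool S l 0 h j hj (by simpa using hm)

theorem pairwise_le_of_adj (l : List Int)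
    (h : ∀ j : Nat, j + 1 < l.length → l.getD j 0 ≤ l.getD (j + 1) 0) :
    l.Pairwise (· ≤ ·) := by
  have key : ∀ d a : Nat, a + d < l.length → l.getD a 0 ≤ l.getD (a + d) 0 := by
    intro d
    induction d with
    | zero => intro a _; simp
    | succ d ih =>
      intro a ha
      calc l.getD a 0 ≤ l.getD (a + d) 0 := ih a (by omega)
        _ ≤ l.getD (a + d + 1) 0 := h (a + d) (by omega)
        _ = l.getD (a + (d + 1)) 0 := by rw [show a + d + 1 = a + (d + 1) from by omega]
  rw [List.pairwise_iff_getElem]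
  intro p q hp hq hpq
  have hk := key (q - p) p (by omega)
  rw [show p + (q - p) = q from by omega] at hk
  rwa [List.getD_eq_getElem l 0 hp, List.getD_eq_getElem l 0 hq] at hk

theorem bsorted_drop (S d : Nat) (hd : S ∣ d) (l : List Int) (h : BSorted S l) :
    BSorted S (l.drop d) := by
  intro j hj hm
  have hlen : d + j + 1 < l.length := by
    have := hj; simp only [List.length_drop] at this; omega
  have h1 : (l.drop d).getD j 0 = l.getD (d + j) 0 := by
    rw [List.getD_eq_getElem _ 0 (by simp only [List.length_drop]; omega),
        List.getD_eq_getElem _ 0 (by omega), List.getElem_drop]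
  have h2 : (l.drop d).getD (j + 1) 0 = l.getD (d + (j + 1)) 0 := by
    rw [List.getD_eq_getElem _ 0 (by simp only [List.length_drop]; omega),
        List.getD_eq_getElem _ 0 (by omega), List.getElem_drop]
  rw [h1, h2, show d + (j + 1) = (d + j) + 1 from by omega]
  apply h (d + j) (by omega)
  obtain ⟨c, rfl⟩ := hd
  rw [show S * c + j + 1 = S * c + (j + 1) from by omega, Nat.mul_add_mod]
  exact hm

theorem pairwise_take (S : Nat) (l : List Int) (h : BSorted S l) :
    (l.take S).Pairwise (· ≤ ·) := by
  apply pairwise_le_of_adj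
  intro j hj
  simp only [List.length_take] at hj
  have hjS : j + 1 < S := by omega
  have hjl : j + 1 < l.length := by omega
  have h1 : (l.take S).getD j 0 = l.getD j 0 := by
    rw [List.getD_eq_getElem _ 0 (by simp [List.length_take]; omega),
        List.getD_eq_getElem _ 0 (by omega), List.getElem_take]
  have h2 : (l.take S).getD (j + 1) 0 = l.getD (j + 1) 0 := by
    rw [List.getD_eq_getElem _ 0 (by simp [List.length_take]; omega),
        List.getD_eq_getElem _ 0 (by omega), List.getElem_take]
  rw [h1, h2]
  exact h j (by omega) (by rw [Nat.mod_eq_of_lt hjS]; omega)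

theorem mergeTwo_perm : ∀ (a b : List Int), (mergeTwo a b).Perm (a ++ b)
  | [], b => by simp [mergeTwo]
  | x :: a, [] => by simp [mergeTwo]
  | x :: a, y :: b => by
    by_cases h : x ≤ y
    · simp only [mergeTwo, if_pos h]
      exact ((mergeTwo_perm a (y :: b)).cons x)
    · simp only [mergeTwo, if_neg h]
      exact ((mergeTwo_perm (x :: a) b).cons y).trans List.perm_middle.symm

theorem mergeTwo_mem (a b : List Int) (z : Int) : z ∈ mergeTwo a b ↔ z ∈ a ∨ z ∈ b := by
  rw [(mergeTwo_perm a b).mem_iff, List.mem_append]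

theorem mergeTwo_pairwise : ∀ (a b : List Int), a.Pairwise (· ≤ ·) → b.Pairwise (· ≤ ·) →
    (mergeTwo a b).Pairwise (· ≤ ·)
  | [], b, _, hb => by simpa [mergeTwo] using hb
  | x :: a, [], ha, _ => by simpa [mergeTwo] using ha
  | x :: a, y :: b, ha, hb => by
    obtain ⟨hxa, ha'⟩ := List.pairwise_cons.mp ha
    obtain ⟨hyb, hb'⟩ := List.pairwise_cons.mp hb
    by_cases h : x ≤ y
    · simp only [mergeTwo, if_pos h]
      refine List.pairwise_cons.mpr ⟨?_, mergeTwo_pairwise a (y :: b) ha' hb⟩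
      intro z hz
      rcases (mergeTwo_mem a (y :: b) z).mp hz with hz | hz
      · exact hxa z hz
      · rcases List.mem_cons.mp hz with rfl | hz
        · exact h
        · exact le_trans h (hyb z hz)
    · simp only [mergeTwo, if_neg h]
      refine List.pairwise_cons.mpr ⟨?_, mergeTwo_pairwise (x :: a) b ha hb'⟩
      intro z hz
      rcases (mergeTwo_mem (x :: a) b z).mp hz with hz | hz
      · rcases List.mem_cons.mp hz with rfl | hz
        · exact le_of_not_ge h
        · exact le_trans (le_of_not_ge h) (hxa z hz)
      · exact hyb z hz

theorem mergeTwo_eq_sorted (a b : List Int) (ha : a.Pairwise (· ≤ ·)) (hb : b.Pairwise (· ≤ ·)) :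
    mergeTwo a b = PySem.List.sorted (a ++ b) (fun x => x) false :=
  (PySem.List.sorted_id_eq_of_perm_of_pairwise (a ++ b) (mergeTwo a b)
    (mergeTwo_perm a b) (mergeTwo_pairwise a b ha hb)).symm

-- the common shape both programs are reduced to: m sorted chunks of size C, front to back
def sortedChunks (C : Nat) : Nat → List Int → List Int
  | 0, _ => []
  | m + 1, l => PySem.List.sorted (l.take C) (fun x => x) false ++ sortedChunks C m (l.drop C)

theorem sortedChunks_nil (C m : Nat) : sortedChunks C m [] = [] := by
  induction m with
  | zero => rfl
  | succ m ih => simp [sortedChunks, ih, PySem.List.sorted_eq_nil_iff]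

theorem slicePair (l : List Int) (j s : Int) (hj : 0 ≤ j) (hs : 0 ≤ s) :
    PySem.List.slice l (some j) (some (j + s)) ++
      PySem.List.slice l (some (j + s)) (some (j + s * 2)) =
    (l.drop j.toNat).take (s.toNat * 2) := by
  rw [PySem.List.slice_toNat l hj (by omega), PySem.List.slice_toNat l (by omega) (by omega)]
  rw [show (j + s).toNat = j.toNat + s.toNat from by omega,
      show (j + s * 2).toNat = j.toNat + s.toNat * 2 from by omega]
  rw [show j.toNat + s.toNat - j.toNat = s.toNat from by omega,
      show j.toNat + s.toNat * 2 - (j.toNat + s.toNat) = s.toNat from by omega,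
      show l.drop (j.toNat + s.toNat) = (l.drop j.toNat).drop s.toNat from (List.drop_drop).symm,
      show s.toNat * 2 = s.toNat + s.toNat from by omega, List.take_add]

theorem flatMap_range_eq_chunks (C m : Nat) (l : List Int) :
    (List.range m).flatMap
      (fun k => PySem.List.sorted ((l.drop (C * k)).take C) (fun x => x) false) =
    sortedChunks C m l := by
  induction m generalizing l with
  | zero => rfl
  | succ m ih =>
    rw [List.range_succ_eq_map, List.flatMap_cons, List.flatMap_map]
    have hshift : (fun a => PySem.List.sorted (List.take C (List.drop (C * (a + 1)) l)) (fun x => x) false)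
        = (fun k => PySem.List.sorted (List.take C (List.drop (C * k) (l.drop C))) (fun x => x) false) := by
      funext k
      rw [List.drop_drop, show C + C * k = C * (k + 1) from by ring]
    rw [hshift, ih (l.drop C)]
    show _ ++ _ = sortedChunks C (m + 1) l
    simp only [sortedChunks, Nat.mul_zero, List.drop_zero]

theorem key_portA (S : Nat) (hS : 0 < S) (l : List Int) :
    (PySem.List.pyRange 0 (PySem.List.len l) (((S : Nat) : Int) * 2)).foldl
      (fun tmp j =>
        tmp ++ PySem.List.sorted
          (PySem.List.slice l (some j) (some (j + ((S : Nat) : Int))) ++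
           PySem.List.slice l (some (j + ((S : Nat) : Int))) (some (j + ((S : Nat) : Int) * 2)))
          (fun x => x) false)
      []
    = sortedChunks (2 * S) ((l.length + 2 * S - 1) / (2 * S)) l := by
  rw [PySem.List.foldl_append_eq_flatMap, PySem.List.pyRange_of_pos 0 _ (by positivity),
      List.flatMap_map, List.nil_append]
  have hcount : (if (0 : Int) < PySem.List.len l
      then ((PySem.List.len l - 0 + ((S : Nat) : Int) * 2 - 1) / (((S : Nat) : Int) * 2)).toNat
      else 0) = (l.length + 2 * S - 1) / (2 * S) := by
    simp only [PySem.List.len_eq]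
    rcases Nat.eq_zero_or_pos l.length with h0 | hp
    · rw [h0, if_neg (by norm_num)]
      rw [Nat.div_eq_of_lt (by omega)]
    · rw [if_pos (by exact_mod_cast hp)]
      rw [show ((l.length : Int) - 0 + ((S : Nat) : Int) * 2 - 1) = ((l.length + 2 * S - 1 : Nat) : Int) from by omega]
      rw [show (((S : Nat) : Int) * 2) = ((2 * S : Nat) : Int) from by push_cast; ring]
      rw [← Int.natCast_div, Int.toNat_natCast]
  rw [hcount, ← flatMap_range_eq_chunks (2 * S) _ l]
  congr 1
  funext k
  rw [slicePair l _ _ (by positivity) (by positivity)]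
  rw [show ((0 : Int) + ((S : Nat) : Int) * 2 * (k : Int)).toNat = 2 * S * k from by
        rw [show (0 : Int) + ((S : Nat) : Int) * 2 * (k : Int) = ((2 * S * k : Nat) : Int) from by
              push_cast; ring,
            Int.toNat_natCast],
      show (((S : Nat) : Int)).toNat * 2 = 2 * S from by rw [Int.toNat_natCast]; ring]

theorem key_portB (S : Nat) (hS : 0 < S) (m : Nat) :
    ∀ l : List Int, BSorted S l → l.length ≤ m * (2 * S) →
      altLoop S l = sortedChunks (2 * S) m l := by
  induction m with
  | zero =>
    intro l _ hlen
    have : l = [] := List.eq_nil_of_length_eq_zero (by omega)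
    subst this
    rw [altLoop]
    simp [hS.ne', sortedChunks]
  | succ m ih =>
    intro l hbs hlen
    by_cases hl : l = []
    · subst hl
      rw [altLoop, sortedChunks_nil]
      simp [hS.ne']
    · rw [altLoop, dif_neg hS.ne', dif_neg hl]
      show _ = sortedChunks (2 * S) (m + 1) l
      simp only [sortedChunks]
      congr 1
      · rw [mergeTwo_eq_sorted _ _ (pairwise_take S l hbs)
            (pairwise_take S _ (bsorted_drop S S ⟨1, by ring⟩ l hbs))]
        congr 1
        rw [show 2 * S = S + S from by ring, List.take_add]
      · rw [show S * 2 = 2 * S from by ring]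
        apply ih _ (bsorted_drop S (2 * S) ⟨2, by ring⟩ l hbs)
        have hx : (m + 1) * (2 * S) = m * (2 * S) + 2 * S := by ring
        simp only [List.length_drop]
        omega

-- ===== VERDICT (by name: the statement is the Claim_ definition above) =====
theorem next_merge_sort_spec : Claim_equal_next_merge_sort := by
  intro i now _ hpre
  obtain ⟨hi1, hi2, hbs⟩ := hpre
  unfold Spec_next_merge_sort
  have hS : 0 < 2 ^ (i - 1).toNat := Nat.two_pow_pos _
  have hstep : ((2 : Int) ^ (i - 1).toNat) = ((2 ^ (i - 1).toNat : Nat) : Int) := by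
    push_cast; ring
  have hA : next_merge_sort i now
      = sortedChunks (2 * 2 ^ (i - 1).toNat)
          ((now.length + 2 * 2 ^ (i - 1).toNat - 1) / (2 * 2 ^ (i - 1).toNat)) now := by
    simp only [next_merge_sort]
    rw [hstep]
    exact key_portA _ hS now
  have hB : next_merge_sort_alt i now = altLoop (2 ^ (i - 1).toNat) now := rfl
  rw [hA, hB]
  symm
  apply key_portB _ hS _ now (bsorted_of_pre _ now hbs)
  set n := now.length
  set C := 2 * 2 ^ (i - 1).toNat with hC
  have hCpos : 0 < C := by positivity
  have h1 := Nat.div_add_mod (n + C - 1) C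
  have h2 := Nat.mod_lt (n + C - 1) hCpos
  have h3 : ((n + C - 1) / C) * C = C * ((n + C - 1) / C) := Nat.mul_comm _ _
  omega
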